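-- pv_equiv track=rewrite | github.com/g0goTAS/dr-sudoku-router | inputGenerator.py | getInputsToNextSquare
-- ===== SOURCE A (Python) =====
-- A = '|    0,    0,    0,    0,.......A...|\n'
--
-- LEFT = '|    0,    0,    0,    0,..L........|\n'
--
-- RIGHT = '|    0,    0,    0,    0,...R.......|\n'
--
-- UP = '|    0,    0,    0,    0,U..........|\n'
--
-- DOWN = '|    0,    0,    0,    0,.D.........|\n'
--
-- NOTHING = '|    0,    0,    0,    0,...........|\n'
--
-- def getInputsToNextSquare(currentLocation, nextLocation):
--     direction = ((nextLocation[0] - currentLocation[0] + 9) % 9, (nextLocation[1] - currentLocation[1] + 9) % 9)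
--     requiredInputs = []
--     if 5 > direction[0] > 0:
--         requiredInputs.append([RIGHT, direction[0]])
--     if 9 > direction[0] > 4:
--         requiredInputs.append([LEFT, 9 - direction[0]])
--     if 5 > direction[1] > 0:
--         requiredInputs.append([DOWN, direction[1]])
--     if 9 > direction[1] > 4:
--         requiredInputs.append([UP, 9 - direction[1]])
--
--     inputs = ''
--     lastInput = None
--     while requiredInputs:
--         candidateInputs = list(filter(lambda i: i[0] != lastInput, requiredInputs))
--         if candidateInputs:
--             sortedInputs = sorted(candidateInputs, key=lambda input: input[1], reverse=True)
--             inputs += sortedInputs[0][0]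
--             lastInput = sortedInputs[0][0]
--             sortedInputs[0][1] -= 1
--             if sortedInputs[0][1] == 0:
--                 requiredInputs.remove(sortedInputs[0])
--         else:
--             inputs += NOTHING
--             lastInput = NOTHING
--     inputs += A
--     return inputs
-- ===== SOURCE B (Python) =====
-- A = '|    0,    0,    0,    0,.......A...|\n'
--
-- LEFT = '|    0,    0,    0,    0,..L........|\n'
--
-- RIGHT = '|    0,    0,    0,    0,...R.......|\n'
--
-- UP = '|    0,    0,    0,    0,U..........|\n'
--
-- DOWN = '|    0,    0,    0,    0,.D.........|\n'
--
-- NOTHING = '|    0,    0,    0,    0,...........|\n'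
--
--
-- def getInputsToNextSquare(currentLocation, nextLocation):
--     dx = (nextLocation[0] - currentLocation[0] + 9) % 9
--     dy = (nextLocation[1] - currentLocation[1] + 9) % 9
--     # horizontal then vertical move (if any), as (frame, count)
--     h = (RIGHT, dx) if dx < 5 else (LEFT, 9 - dx)
--     v = (DOWN, dy) if dy < 5 else (UP, 9 - dy)
--     # order by count descending; horizontal wins ties
--     big, small = (h, v) if h[1] >= v[1] else (v, h)
--     parts = [big[0] + small[0]] * small[1]          # alternating pairs
--     leftover = big[1] - small[1]
--     if leftover > 0:                                # first leftover directly,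
--         parts.append(big[0])                        # the rest each after a pause
--         parts.extend([NOTHING + big[0]] * (leftover - 1))
--     parts.append(A)
--     return ''.join(parts)
-- ===== Notes on version B (the rewrite author's own statement) =====
-- stated objective: simpler
-- what changed: Replaces A's while-loop that repeatedly filters, sorts and decrements a mutable list of required moves with a closed-form construction: emit min-count alternating big+small pairs, then the leftover majority moves (first directly, the rest each after a NOTHING pause), then A.
import Mathlib
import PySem

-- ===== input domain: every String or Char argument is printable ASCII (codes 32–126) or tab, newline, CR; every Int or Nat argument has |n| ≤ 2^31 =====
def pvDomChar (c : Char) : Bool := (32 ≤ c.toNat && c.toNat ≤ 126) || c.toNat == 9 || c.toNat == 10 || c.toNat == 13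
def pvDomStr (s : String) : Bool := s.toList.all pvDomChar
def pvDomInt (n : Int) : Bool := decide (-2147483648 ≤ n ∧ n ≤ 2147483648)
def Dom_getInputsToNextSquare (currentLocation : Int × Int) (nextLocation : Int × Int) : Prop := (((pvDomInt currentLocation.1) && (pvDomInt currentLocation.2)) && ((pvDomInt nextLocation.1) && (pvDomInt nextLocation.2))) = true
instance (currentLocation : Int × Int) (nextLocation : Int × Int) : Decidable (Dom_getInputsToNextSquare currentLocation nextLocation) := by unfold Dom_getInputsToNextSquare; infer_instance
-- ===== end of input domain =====

-- B replaces A's sort/filter/decrement while-loop by a direct closed construction of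
-- the output (alternating pairs, then the leftover majority moves with pauses); objective: simpler.

-- module constants
def pyA : String := "|    0,    0,    0,    0,.......A...|\n"
def pyLEFT : String := "|    0,    0,    0,    0,..L........|\n"
def pyRIGHT : String := "|    0,    0,    0,    0,...R.......|\n"
def pyUP : String := "|    0,    0,    0,    0,U..........|\n"
def pyDOWN : String := "|    0,    0,    0,    0,.D.........|\n"
def pyNOTHING : String := "|    0,    0,    0,    0,...........|\n"

-- ===== PORT A =====
-- the 'while requiredInputs:' loop, step for step; fuel only makes it total (32 is
-- never reached: each iteration either decrements a count ≤ 4 or alternates with NOTHING).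
-- The in-place 'sortedInputs[0][1] -= 1' mutates the aliased entry of requiredInputs, so it
-- is modelled by replacing that entry; '.remove' removes the first equal element (entries
-- carry distinct direction strings, so first-equal is that same entry).
def pyALoop (fuel : Nat) (required : List (String × Int)) (inputs : String) (last : Option String) : String :=
  match fuel with
  | 0 => inputs
  | fuel + 1 =>
    if required.isEmpty then inputs
    else
      let candidates := required.filter (fun i => !(some i.1 == last))
      match candidates with
      | [] => pyALoop fuel required (inputs ++ pyNOTHING) (some pyNOTHING)
      | c :: cs =>
        match PySem.List.sorted (c :: cs) (fun i => i.2) true with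
        | [] => inputs   -- unreachable: sorted preserves nonemptiness
        | top :: _ =>
          let newTop := (top.1, top.2 - 1)
          let required' := required.map (fun i => if i == top then newTop else i)
          let required'' := if newTop.2 == 0 then ((PySem.List.remove? required' newTop).getD required') else required'
          pyALoop fuel required'' (inputs ++ top.1) (some top.1)

def pyACore (direction : Int × Int) : String :=
  let r0 : List (String × Int) := []
  let r1 := if 0 < direction.1 ∧ direction.1 < 5 then r0 ++ [(pyRIGHT, direction.1)] else r0
  let r2 := if 4 < direction.1 ∧ direction.1 < 9 then r1 ++ [(pyLEFT, 9 - direction.1)] else r1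
  let r3 := if 0 < direction.2 ∧ direction.2 < 5 then r2 ++ [(pyDOWN, direction.2)] else r2
  let r4 := if 4 < direction.2 ∧ direction.2 < 9 then r3 ++ [(pyUP, 9 - direction.2)] else r3
  pyALoop 32 r4 "" none ++ pyA

def getInputsToNextSquare (currentLocation : Int × Int) (nextLocation : Int × Int) : String :=
  pyACore (PySem.Int.mod (nextLocation.1 - currentLocation.1 + 9) 9,
           PySem.Int.mod (nextLocation.2 - currentLocation.2 + 9) 9)

-- ===== PORT B =====
def pyBCore (d : Int × Int) : String :=
  let h := if d.1 < 5 then (pyRIGHT, d.1) else (pyLEFT, 9 - d.1)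
  let v := if d.2 < 5 then (pyDOWN, d.2) else (pyUP, 9 - d.2)
  let bs := if h.2 ≥ v.2 then (h, v) else (v, h)
  let big := bs.1
  let small := bs.2
  let parts := List.replicate small.2.toNat (big.1 ++ small.1)
  let leftover := big.2 - small.2
  let parts2 := if leftover > 0 then
      parts ++ [big.1] ++ List.replicate (leftover - 1).toNat (pyNOTHING ++ big.1)
    else parts
  String.join (parts2 ++ [pyA])

def getInputsToNextSquare_alt (currentLocation : Int × Int) (nextLocation : Int × Int) : String :=
  pyBCore (PySem.Int.mod (nextLocation.1 - currentLocation.1 + 9) 9,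
           PySem.Int.mod (nextLocation.2 - currentLocation.2 + 9) 9)

-- ===== PRECONDITION & SPEC =====
def Spec_getInputsToNextSquare (currentLocation : Int × Int) (nextLocation : Int × Int) (out : String) : Prop := out = getInputsToNextSquare_alt currentLocation nextLocation
instance (currentLocation : Int × Int) (nextLocation : Int × Int) (out : String) : Decidable (Spec_getInputsToNextSquare currentLocation nextLocation out) := by unfold Spec_getInputsToNextSquare; infer_instance

-- ===== CLAIM (what is proved, stated in full; the proofs are below) =====
def Claim_equal_getInputsToNextSquare : Prop := ∀ (currentLocation : Int × Int) (nextLocation : Int × Int), Dom_getInputsToNextSquare currentLocation nextLocation → Spec_getInputsToNextSquare currentLocation nextLocation (getInputsToNextSquare currentLocation nextLocation)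

-- ===== LEMMAS AND PROOFS =====
-- both cores agree on every possible direction pair (81 cases)
set_option maxRecDepth 4000 in
theorem core_eq : ∀ (d1 d2 : Int), 0 ≤ d1 → d1 < 9 → 0 ≤ d2 → d2 < 9 →
    pyACore (d1, d2) = pyBCore (d1, d2) := by
  intro d1 d2 h1 h2 h3 h4
  interval_cases d1 <;> interval_cases d2 <;> decide

-- ===== VERDICT (by name: the statement is the Claim_ definition above) =====
theorem getInputsToNextSquare_spec : Claim_equal_getInputsToNextSquare := by
  intro c n _
  exact core_eq _ _
    (PySem.Int.mod_nonneg _ (by norm_num)) (PySem.Int.mod_lt _ (by norm_num))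
    (PySem.Int.mod_nonneg _ (by norm_num)) (PySem.Int.mod_lt _ (by norm_num))
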